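-- pv_equiv track=rewrite | github.com/ayushi8795/Leetcode-Python | 3450-maximum-students-on-a-single-bench/3450-maximum-students-on-a-single-bench.py | maxStudentsOnBench
-- ===== SOURCE A (Python) =====
-- from typing import List
--
-- def maxStudentsOnBench(students: List[List[int]]) -> int:
--     has = {}
--
--     for stu in students:
--         stu_id = stu[0]
--         bench_id = stu[1]
--
--         if bench_id in has and stu_id not in has.values():
--             has[bench_id].add(stu_id)
--         elif bench_id not in has and stu_id not in has.values():
--             has[bench_id] = {stu_id}
--
--     maxlen = 0
--     if has:
--         for key, value in has.items():
--             maxlen = max(maxlen,len(value))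
--     return maxlen
-- ===== SOURCE B (Python) =====
-- from typing import List
--
-- def maxStudentsOnBench(students: List[List[int]]) -> int:
--     # Sort a copy by bench id so each bench's entries are contiguous,
--     # then scan runs, counting distinct student ids per run.
--     arr = sorted(students, key=lambda s: s[1])
--     best = 0
--     i = 0
--     n = len(arr)
--     while i < n:
--         bench = arr[i][1]
--         seen = set()
--         j = i
--         while j < n and arr[j][1] == bench:
--             seen.add(arr[j][0])
--             j += 1
--         best = max(best, len(seen))
--         i = j
--     return best
-- ===== Notes on version B (the rewrite author's own statement) =====
-- stated objective: alternative
-- what changed: B builds no dict: it sorts a copy of the input by bench id and does one linear scan over contiguous equal-bench runs, counting distinct student ids per run with a fresh set, instead of A's single-pass hash-map grouping (with its always-false 'stu_id in has.values()' check) followed by a max over the dict values.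
import Mathlib
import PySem

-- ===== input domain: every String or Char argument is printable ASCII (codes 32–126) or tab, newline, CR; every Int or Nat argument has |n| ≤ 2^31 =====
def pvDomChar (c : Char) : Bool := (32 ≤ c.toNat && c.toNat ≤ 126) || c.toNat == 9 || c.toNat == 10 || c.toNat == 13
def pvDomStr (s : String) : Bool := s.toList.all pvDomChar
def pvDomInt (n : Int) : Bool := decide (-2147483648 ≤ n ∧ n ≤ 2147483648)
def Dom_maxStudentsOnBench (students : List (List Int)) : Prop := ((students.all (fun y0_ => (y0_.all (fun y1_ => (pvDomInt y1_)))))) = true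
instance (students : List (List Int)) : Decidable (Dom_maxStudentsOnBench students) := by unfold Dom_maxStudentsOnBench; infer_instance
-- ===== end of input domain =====

-- B replaces A's hash-map grouping by sorting a copy of the input by bench id and scanning
-- contiguous runs, counting distinct student ids per run (objective: alternative).

-- ===== PORT A =====

-- shared row accessors: stu[0] and stu[1]; Python raises IndexError on shorter rows,
-- which Pre_ excludes (the default 0 is never reached inside Pre_)
def pvRowId (s : List Int) : Int := PySem.List.pyGetD s 0 0
def pvRowBench (s : List Int) : Int := PySem.List.pyGetD s 1 0

def maxStudentsOnBench (students : List (List Int)) : Int :=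
  let has : PySem.Dict Int (PySem.Set Int) :=
    students.foldl (fun has stu =>
      let stu_id := pvRowId stu
      let bench_id := pvRowBench stu
      -- Python's 'stu_id in has.values()' compares an int with each value, which is a set;
      -- int == set is always False in Python, so each comparison is ported as 'false'
      let idInValues : Bool := has.values.any (fun _v => false)
      if has.contains bench_id && !idInValues then
        has.modify bench_id PySem.Set.empty (fun s => PySem.Set.add s stu_id)
      else if !(has.contains bench_id) && !idInValues then
        has.insert bench_id (PySem.Set.ofList [stu_id])
      else
        has) PySem.Dict.empty
  let maxlen : Int := 0
  if !has.items.isEmpty then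
    has.items.foldl (fun m kv => max m ((kv.2.length : Nat) : Int)) maxlen
  else
    maxlen

-- ===== PORT B =====

-- inner while loop: consume the run of entries whose bench id equals `bench`,
-- adding their student ids to `seen`; returns (seen, rest of the list)
def pvRunLoop (bench : Int) (seen : PySem.Set Int) : List (List Int) → PySem.Set Int × List (List Int)
  | [] => (seen, [])
  | s :: rest =>
    if pvRowBench s == bench then pvRunLoop bench (PySem.Set.add seen (pvRowId s)) rest
    else (seen, s :: rest)

theorem pvRunLoop_length_le (bench : Int) (seen : PySem.Set Int) (l : List (List Int)) :
    (pvRunLoop bench seen l).2.length ≤ l.length := by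
  induction l generalizing seen with
  | nil => simp [pvRunLoop]
  | cons s rest ih =>
    simp only [pvRunLoop]
    split
    · exact Nat.le_succ_of_le (ih _)
    · simp

-- outer while loop: one iteration per run, keeping the running maximum
def pvOuter : List (List Int) → Int → Int
  | [], best => best
  | s :: rest, best =>
    let r := pvRunLoop (pvRowBench s) PySem.Set.empty (s :: rest)
    pvOuter r.2 (max best ((r.1.length : Nat) : Int))
termination_by l _ => l.length
decreasing_by
  simp only [pvRunLoop, beq_self_eq_true, if_pos]
  exact Nat.lt_succ_of_le (pvRunLoop_length_le _ _ _)

def maxStudentsOnBench_alt (students : List (List Int)) : Int :=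
  pvOuter (PySem.List.sorted students (fun s => pvRowBench s) false) 0

-- ===== PRECONDITION & SPEC =====

-- Pre_ excludes exactly the inputs where some row has fewer than two entries:
-- there both A and B raise IndexError (A at stu[0]/stu[1], B in the sort key s[1]).
def Pre_maxStudentsOnBench (students : List (List Int)) : Prop :=
  ∀ s ∈ students, 2 ≤ s.length
instance (students : List (List Int)) : Decidable (Pre_maxStudentsOnBench students) := by
  unfold Pre_maxStudentsOnBench; infer_instance

def pvWitness_maxStudentsOnBench : List (List Int) := [[1, 2], [3, 2], [3, 5]]

def Spec_maxStudentsOnBench (students : List (List Int)) (out : Int) : Prop := out = maxStudentsOnBench_alt students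
instance (students : List (List Int)) (out : Int) : Decidable (Spec_maxStudentsOnBench students out) := by unfold Spec_maxStudentsOnBench; infer_instance

-- ===== CLAIM (what is proved, stated in full; the proofs are below) =====
def Claim_equal_maxStudentsOnBench : Prop := ∀ (students : List (List Int)), Dom_maxStudentsOnBench students → Pre_maxStudentsOnBench students → Spec_maxStudentsOnBench students (maxStudentsOnBench students)

-- ===== LEMMAS AND PROOFS =====

-- number of distinct student ids on bench b among the rows of l
def pvG (l : List (List Int)) (b : Int) : Int :=
  ((PySem.Set.ofList ((l.filter (fun s => pvRowBench s == b)).map pvRowId)).length : Nat)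

-- the canonical grouping step that A's loop body is equal to
def pvStep (d : PySem.Dict Int (PySem.Set Int)) (stu : List Int) : PySem.Dict Int (PySem.Set Int) :=
  d.modify (pvRowBench stu) PySem.Set.empty (fun s => PySem.Set.add s (pvRowId stu))

theorem pvStep_eq (d : PySem.Dict Int (PySem.Set Int)) (stu : List Int) :
    (let stu_id := pvRowId stu
     let bench_id := pvRowBench stu
     let idInValues : Bool := d.values.any (fun _v => false)
     if d.contains bench_id && !idInValues then
       d.modify bench_id PySem.Set.empty (fun s => PySem.Set.add s stu_id)
     else if !(d.contains bench_id) && !idInValues then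
       d.insert bench_id (PySem.Set.ofList [stu_id])
     else
       d) = pvStep d stu := by
  by_cases hc : d.contains (pvRowBench stu) = true
  · simp [hc, pvStep]
  · simp only [Bool.not_eq_true] at hc
    simp [hc, pvStep, PySem.Dict.modify, PySem.Dict.getD_of_not_contains d _ hc,
      PySem.Set.ofList, PySem.Set.add, PySem.Set.empty, PySem.Set.contains]

theorem pvGetD_fold (l : List (List Int)) (d : PySem.Dict Int (PySem.Set Int)) (b : Int) :
    (l.foldl pvStep d).getD b PySem.Set.empty =
      PySem.Set.update (d.getD b PySem.Set.empty) ((l.filter (fun s => pvRowBench s == b)).map pvRowId) := by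
  induction l generalizing d with
  | nil => simp [PySem.Set.update]
  | cons x t ih =>
    simp only [List.foldl_cons, ih, List.filter_cons]
    by_cases hb : pvRowBench x = b
    · simp [pvStep, hb, PySem.Set.update]
    · simp [pvStep, PySem.Dict.getD_modify, hb, Ne.symm hb]

-- A computes the running maximum of the distinct-count over benches in first-occurrence order
theorem pvA_eq (students : List (List Int)) :
    maxStudentsOnBench students =
      (PySem.Set.ofList (students.map pvRowBench)).foldl (fun m b => max m (pvG students b)) 0 := by
  unfold maxStudentsOnBench
  rw [PySem.List.foldl_congr_mem _ _ pvStep _ (fun acc x _ => pvStep_eq acc x)]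
  have hnodup : (students.foldl pvStep PySem.Dict.empty).keys.Nodup := by
    have := PySem.Dict.nodup_keys_foldl_modify_key students pvRowBench PySem.Set.empty
      (fun _ x => fun s => PySem.Set.add s (pvRowId x)) PySem.Dict.empty PySem.Dict.nodup_keys_empty
    simpa [pvStep] using this
  have hkeys : (students.foldl pvStep PySem.Dict.empty).keys = PySem.Set.ofList (students.map pvRowBench) := by
    have := PySem.Dict.keys_foldl_modify_key students pvRowBench PySem.Set.empty
      (fun _ x => fun s => PySem.Set.add s (pvRowId x)) PySem.Dict.empty
    simpa [pvStep, PySem.Dict.keys_empty] using this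
  have hget : ∀ b, (students.foldl pvStep PySem.Dict.empty).getD b PySem.Set.empty =
      PySem.Set.ofList ((students.filter (fun s => pvRowBench s == b)).map pvRowId) := by
    intro b
    rw [pvGetD_fold, PySem.Dict.getD_empty]
    rfl
  dsimp only []
  have hitems := PySem.Dict.items_eq_map_keys (students.foldl pvStep PySem.Dict.empty) hnodup PySem.Set.empty
  rw [hitems, hkeys]
  by_cases hK : PySem.Set.ofList (students.map pvRowBench) = []
  · simp [hK]
  · have hne : ((PySem.Set.ofList (students.map pvRowBench)).map
        (fun k => (k, (students.foldl pvStep PySem.Dict.empty).getD k PySem.Set.empty))).isEmpty = false := by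
      simp [hK]
    rw [hne]
    simp only [Bool.not_false, if_pos]
    rw [List.foldl_map]
    refine PySem.List.foldl_congr_mem _ _ _ _ ?_
    intro acc x _
    rw [hget x]
    rfl

theorem pvRunLoop_spec (b : Int) (l : List (List Int)) (seen : PySem.Set Int) :
    pvRunLoop b seen l =
      (PySem.Set.update seen ((l.takeWhile (fun s => pvRowBench s == b)).map pvRowId),
       l.dropWhile (fun s => pvRowBench s == b)) := by
  induction l generalizing seen with
  | nil => simp [pvRunLoop, PySem.Set.update]
  | cons x t ih =>
    simp only [pvRunLoop, List.takeWhile_cons, List.dropWhile_cons]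
    by_cases hx : (pvRowBench x == b) = true
    · simp [hx, ih, PySem.Set.update]
    · simp [hx, PySem.Set.update]

-- on a list sorted by bench id, the first run is a filter and so is the remainder
theorem pvTakeDropFilter (l : List (List Int)) (b : Int)
    (hmin : ∀ x ∈ l, b ≤ pvRowBench x)
    (hpw : l.Pairwise (fun a c => pvRowBench a ≤ pvRowBench c)) :
    l.takeWhile (fun s => pvRowBench s == b) = l.filter (fun s => pvRowBench s == b) ∧
    l.dropWhile (fun s => pvRowBench s == b) = l.filter (fun s => !(pvRowBench s == b)) := by
  induction l with
  | nil => simp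
  | cons x t ih =>
    rcases List.pairwise_cons.mp hpw with ⟨hx, hpt⟩
    by_cases hb : pvRowBench x = b
    · have ht : ∀ y ∈ t, b ≤ pvRowBench y := fun y hy => hmin y (List.mem_cons_of_mem _ hy)
      rcases ih ht hpt with ⟨h1, h2⟩
      simp [hb, h1, h2]
    · have hlt : b < pvRowBench x := lt_of_le_of_ne (hmin x (List.mem_cons_self)) (Ne.symm hb)
      have hall : ∀ y ∈ t, ¬(pvRowBench y = b) := by
        intro y hy h
        have := hx y hy
        omega
      have hf1 : List.filter (fun s => pvRowBench s == b) t = [] := by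
        rw [List.filter_eq_nil_iff]
        intro y hy; simp [hall y hy]
      have hf2 : List.filter (fun s => !(pvRowBench s == b)) t = t := by
        rw [List.filter_eq_self]
        intro y hy; simp [hall y hy]
      constructor
      · simp [hb, hf1]
      · simp [hb, hf2]

theorem pvAdd_filter_pos (q : Int → Bool) (x : Int) (hq : q x = true) (s : PySem.Set Int) :
    PySem.Set.add (s.filter q) x = (PySem.Set.add s x).filter q := by
  by_cases hx : x ∈ s
  · have h1 : PySem.Set.contains s x = true := by
      simp only [PySem.Set.contains]; simp [hx]
    have h2 : PySem.Set.contains (s.filter q) x = true := by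
      simp only [PySem.Set.contains]; simp [List.mem_filter, hx, hq]
    simp only [PySem.Set.add, h1, h2, if_pos]
  · have h1 : PySem.Set.contains s x = false := by
      simp only [PySem.Set.contains]; simp [hx]
    have h2 : PySem.Set.contains (s.filter q) x = false := by
      simp only [PySem.Set.contains]; simp [List.mem_filter, hx]
    simp only [PySem.Set.add, h1, h2, Bool.false_eq_true, reduceIte]
    simp [List.filter_append, hq]

theorem pvAdd_filter_neg (q : Int → Bool) (x : Int) (hq : q x = false) (s : PySem.Set Int) :
    (PySem.Set.add s x).filter q = s.filter q := by
  by_cases hx : PySem.Set.contains s x = true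
  · simp only [PySem.Set.add, hx, reduceIte]
  · simp only [PySem.Set.add, hx, Bool.false_eq_true, reduceIte]
    simp [List.filter_append, hq]

theorem pvUpdate_filter (q : Int → Bool) (xs : List Int) (s : PySem.Set Int) :
    PySem.Set.update (s.filter q) (xs.filter q) = (PySem.Set.update s xs).filter q := by
  induction xs generalizing s with
  | nil => simp [PySem.Set.update]
  | cons x t ih =>
    rw [List.filter_cons]
    have hcons : ∀ (r : PySem.Set Int) (u : List Int),
        PySem.Set.update r (x :: u) = PySem.Set.update (PySem.Set.add r x) u :=
      fun r u => rfl
    by_cases hq : q x = true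
    · simp only [hq, if_pos, hcons]
      rw [pvAdd_filter_pos q x hq s, ih (PySem.Set.add s x)]
    · have hq' : q x = false := by simpa using hq
      simp only [hq', Bool.false_eq_true, reduceIte, hcons]
      rw [ih s, ← ih s, ← ih (PySem.Set.add s x), pvAdd_filter_neg q x hq' s]

theorem pvOfList_filter (q : Int → Bool) (xs : List Int) :
    PySem.Set.ofList (xs.filter q) = (PySem.Set.ofList xs).filter q := by
  have := pvUpdate_filter q xs PySem.Set.empty
  simpa [PySem.Set.empty, PySem.Set.update, PySem.Set.ofList] using this

theorem pvOfList_cons (xs : List Int) (b0 : Int) :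
    PySem.Set.ofList (b0 :: xs) = b0 :: (PySem.Set.ofList xs).filter (fun y => !(y == b0)) := by
  have h1 : PySem.Set.ofList (b0 :: xs) = PySem.Set.update [b0] xs := by
    show PySem.Set.update (PySem.Set.add PySem.Set.empty b0) xs = _
    norm_num [PySem.Set.add, PySem.Set.empty, PySem.Set.contains]
  rw [h1, PySem.Set.update_eq_append_filter]
  have h2 : (fun y => !PySem.Set.contains [b0] y) = (fun y : Int => !(y == b0)) := by
    funext y; by_cases h : y = b0 <;> simp [PySem.Set.contains, h]
  rw [h2]
  rfl

-- B's outer loop on a bench-sorted list computes the running maximum of the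
-- distinct-count over benches in order of first occurrence
theorem pvOuter_spec (n : Nat) (l : List (List Int)) (hn : l.length ≤ n)
    (hpw : l.Pairwise (fun a c => pvRowBench a ≤ pvRowBench c)) (best : Int) :
    pvOuter l best = (PySem.Set.ofList (l.map pvRowBench)).foldl (fun m b => max m (pvG l b)) best := by
  induction n generalizing l best with
  | zero =>
    have hl : l = [] := List.length_eq_zero_iff.mp (Nat.le_zero.mp hn)
    subst hl
    simp [pvOuter, PySem.Set.ofList]
  | succ n ih =>
    cases l with
    | nil => simp [pvOuter, PySem.Set.ofList]
    | cons s rest =>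
      have hmin : ∀ x ∈ s :: rest, pvRowBench s ≤ pvRowBench x := by
        intro x hx
        rcases List.mem_cons.mp hx with h | h
        · subst h; exact le_refl _
        · exact (List.pairwise_cons.mp hpw).1 x h
      obtain ⟨htake, hdrop⟩ := pvTakeDropFilter (s :: rest) (pvRowBench s) hmin hpw
      have hstep : pvOuter (s :: rest) best =
          pvOuter ((s :: rest).filter (fun x => !(pvRowBench x == pvRowBench s)))
            (max best (pvG (s :: rest) (pvRowBench s))) := by
        rw [pvOuter, pvRunLoop_spec, htake, hdrop]
        rfl
      have hrest : (s :: rest).filter (fun x => !(pvRowBench x == pvRowBench s)) =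
          rest.filter (fun x => !(pvRowBench x == pvRowBench s)) := by
        simp
      have hlen : ((s :: rest).filter (fun x => !(pvRowBench x == pvRowBench s))).length ≤ n := by
        rw [hrest]
        exact le_trans (List.length_filter_le _ _) (Nat.succ_le_succ_iff.mp hn)
      have hpw' : ((s :: rest).filter (fun x => !(pvRowBench x == pvRowBench s))).Pairwise
          (fun a c => pvRowBench a ≤ pvRowBench c) :=
        List.Pairwise.sublist List.filter_sublist hpw
      rw [hstep, ih _ hlen hpw']
      have hmap : ((s :: rest).filter (fun x => !(pvRowBench x == pvRowBench s))).map pvRowBench =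
          (rest.map pvRowBench).filter (fun y => !(y == pvRowBench s)) := by
        rw [hrest]
        have h := List.filter_map (f := pvRowBench) (p := fun y => !(y == pvRowBench s)) (l := rest)
        simpa [Function.comp] using h.symm
      have hofl : PySem.Set.ofList ((s :: rest).map pvRowBench) =
          pvRowBench s :: PySem.Set.ofList
            (((s :: rest).filter (fun x => !(pvRowBench x == pvRowBench s))).map pvRowBench) := by
        rw [List.map_cons, pvOfList_cons, hmap, pvOfList_filter]
      rw [hofl, List.foldl_cons]
      refine PySem.List.foldl_congr_mem _ _ _ _ ?_
      intro acc b hb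
      have hbne : b ≠ pvRowBench s := by
        have hb' : b ∈ ((s :: rest).filter (fun x => !(pvRowBench x == pvRowBench s))).map pvRowBench :=
          (PySem.Set.mem_ofList _ _).mp hb
        rcases List.mem_map.mp hb' with ⟨x, hxmem, hxb⟩
        have hx2 := (List.mem_filter.mp hxmem).2
        intro h
        rw [← hxb] at h
        simp [h] at hx2
      have hGG : pvG ((s :: rest).filter (fun x => !(pvRowBench x == pvRowBench s))) b =
          pvG (s :: rest) b := by
        unfold pvG
        have hff : ((s :: rest).filter (fun x => !(pvRowBench x == pvRowBench s))).filter
            (fun x => pvRowBench x == b) = (s :: rest).filter (fun x => pvRowBench x == b) := by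
          rw [List.filter_filter]
          refine List.filter_congr ?_
          intro x _
          by_cases hx : pvRowBench x = pvRowBench s
          · simp [hx, Ne.symm hbne]
          · simp [hx]
        rw [hff]
      rw [hGG]

theorem pvOfList_perm {xs ys : List Int} (h : xs.Perm ys) :
    (PySem.Set.ofList xs).Perm (PySem.Set.ofList ys) := by
  rw [List.perm_ext_iff_of_nodup (PySem.Set.nodup_ofList xs) (PySem.Set.nodup_ofList ys)]
  intro a
  rw [PySem.Set.mem_ofList, PySem.Set.mem_ofList]
  exact ⟨fun ha => h.mem_iff.mp ha, fun ha => h.mem_iff.mpr ha⟩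

theorem pvG_perm {l l' : List (List Int)} (h : l.Perm l') (b : Int) : pvG l b = pvG l' b := by
  unfold pvG
  have := pvOfList_perm ((h.filter (fun s => pvRowBench s == b)).map pvRowId)
  rw [this.length_eq]

-- ===== VERDICT (by name: the statement is the Claim_ definition above) =====
theorem maxStudentsOnBench_spec : Claim_equal_maxStudentsOnBench := by
  intro students _ _
  unfold Spec_maxStudentsOnBench
  rw [pvA_eq]
  unfold maxStudentsOnBench_alt
  have hperm : (PySem.List.sorted students (fun s => pvRowBench s) false).Perm students :=
    PySem.List.sorted_perm students _ false
  rw [pvOuter_spec (PySem.List.sorted students (fun s => pvRowBench s) false).length _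
    (le_refl _) (PySem.List.sorted_pairwise students _) 0]
  rw [PySem.List.foldl_congr_mem
    (PySem.Set.ofList ((PySem.List.sorted students (fun s => pvRowBench s) false).map pvRowBench))
    (fun m b => max m (pvG (PySem.List.sorted students (fun s => pvRowBench s) false) b))
    (fun m b => max m (pvG students b)) 0
    (fun acc x _ => by dsimp only; rw [pvG_perm hperm x])]
  exact List.Perm.foldl_eq (f := fun m b => max m (pvG students b))
    (rcomm := ⟨fun m a b => max_right_comm m (pvG students a) (pvG students b)⟩)
    (pvOfList_perm (hperm.map pvRowBench)).symm 0
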